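-- pv_equiv track=rewrite | github.com/midas-network/midas-ontology-graph-rag | src/midas_llm/utils/prompt/generate_few_shot_from_schema.py | choose_default_enum_value
-- ===== SOURCE A (Python) =====
-- from typing import Any, Dict, List, Optional, Set
--
-- def choose_default_enum_value(enum_vals: List[str]) -> str:
--     """
--     Conservative fallback if no explicit example value is configured.
--     Prefer a substantive value if available; otherwise use an allowed absent value.
--     """
--     preferred_order = [
--         "historical",
--         "national",
--         "yes",
--         "no",
--         "not mentioned",
--         "not specified",
--         "not applicable",
--     ]
--     enum_set = set(enum_vals)
--     for val in preferred_order: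
--         if val in enum_set:
--             return val
--     return enum_vals[0]
-- ===== SOURCE B (Python) =====
-- def choose_default_enum_value(enum_vals):
--     """
--     Conservative fallback if no explicit example value is configured.
--     Single pass over enum_vals against a precomputed rank table.
--     """
--     rank = {
--         "historical": 0,
--         "national": 1,
--         "yes": 2,
--         "no": 3,
--         "not mentioned": 4,
--         "not specified": 5,
--         "not applicable": 6,
--     }
--     best = None
--     best_rank = None
--     for v in enum_vals:
--         r = rank.get(v)
--         if r is not None and (best_rank is None or r < best_rank):
--             best = v
--             best_rank = r
--     if best is not None:
--         return best
--     return enum_vals[0]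
-- ===== Notes on version B (the rewrite author's own statement) =====
-- stated objective: alternative
-- what changed: Instead of scanning the fixed preference list against a set built from the input, B builds a rank table for the preferred values once and makes a single pass over enum_vals tracking the element of minimum rank (first minimum wins), falling back to enum_vals[0] when no element has a rank.
import Mathlib
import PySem

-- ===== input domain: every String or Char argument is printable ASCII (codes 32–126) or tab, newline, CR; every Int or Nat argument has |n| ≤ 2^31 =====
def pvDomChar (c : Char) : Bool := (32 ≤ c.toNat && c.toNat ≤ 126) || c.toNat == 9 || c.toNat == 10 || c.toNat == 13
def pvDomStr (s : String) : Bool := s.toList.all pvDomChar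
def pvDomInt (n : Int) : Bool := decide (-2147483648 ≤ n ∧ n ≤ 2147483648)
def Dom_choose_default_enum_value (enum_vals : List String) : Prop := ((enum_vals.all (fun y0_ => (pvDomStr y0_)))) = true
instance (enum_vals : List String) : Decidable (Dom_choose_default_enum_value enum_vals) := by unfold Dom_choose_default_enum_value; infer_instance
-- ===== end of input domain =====

-- B replaces A's scan of the fixed preference list against set(enum_vals) by a single pass over
-- enum_vals tracking the element of minimum rank in a precomputed rank table (objective: alternative).


-- ===== PORT A =====
-- the 'for val in preferred_order: if val in enum_set: return val' loop of A
def pvLoopA (enum_set : PySem.Set String) (fallback : String) : List String → String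
  | [] => fallback
  | v :: rest => if PySem.Set.contains enum_set v then v else pvLoopA enum_set fallback rest

def choose_default_enum_value (enum_vals : List String) : String :=
  let preferred_order : List String :=
    ["historical", "national", "yes", "no", "not mentioned", "not specified", "not applicable"]
  let enum_set := PySem.Set.ofList enum_vals
  -- enum_vals[0]: Pre_ guarantees nonempty, so the .getD "" default is never taken
  pvLoopA enum_set ((PySem.List.pyGet? enum_vals 0).getD "") preferred_order

-- ===== PORT B =====
-- the rank table 'rank = {...}' of Source B
def pvRank : PySem.Dict String Int :=
  PySem.Dict.ofList
    [("historical", 0), ("national", 1), ("yes", 2), ("no", 3),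
     ("not mentioned", 4), ("not specified", 5), ("not applicable", 6)]

-- the 'for v in enum_vals: …' loop of Source B, carrying (best, best_rank)
def pvLoopB : List String → Option String → Option Int → Option String × Option Int
  | [], best, bestRank => (best, bestRank)
  | v :: rest, best, bestRank =>
    match PySem.Dict.get? pvRank v with
    | none => pvLoopB rest best bestRank
    | some r =>
      if (match bestRank with | none => true | some br => decide (r < br)) then
        pvLoopB rest (some v) (some r)
      else
        pvLoopB rest best bestRank

def choose_default_enum_value_alt (enum_vals : List String) : String :=
  match (pvLoopB enum_vals none none).1 with
  | some b => b
  | none => (PySem.List.pyGet? enum_vals 0).getD ""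

-- ===== PRECONDITION & SPEC =====
-- Pre_ excludes only the empty list, on which Python A raises IndexError at enum_vals[0] (B raises there too).
def Pre_choose_default_enum_value (enum_vals : List String) : Prop := enum_vals ≠ []
instance (enum_vals : List String) : Decidable (Pre_choose_default_enum_value enum_vals) := by unfold Pre_choose_default_enum_value; infer_instance

def pvWitness_choose_default_enum_value : List String := ["maybe", "yes"]

def Spec_choose_default_enum_value (enum_vals : List String) (out : String) : Prop := out = choose_default_enum_value_alt enum_vals
instance (enum_vals : List String) (out : String) : Decidable (Spec_choose_default_enum_value enum_vals out) := by unfold Spec_choose_default_enum_value; infer_instance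

-- ===== CLAIM (what is proved, stated in full; the proofs are below) =====
def Claim_equal_choose_default_enum_value : Prop := ∀ (enum_vals : List String), Dom_choose_default_enum_value enum_vals → Pre_choose_default_enum_value enum_vals → Spec_choose_default_enum_value enum_vals (choose_default_enum_value enum_vals)

-- ===== LEMMAS AND PROOFS =====

-- the j-th preferred value (proof-side abbreviation)
def pstr (j : Nat) : String :=
  ["historical", "national", "yes", "no", "not mentioned", "not specified", "not applicable"].getD j ""

-- proof-side mirror of the rank table
def rankOf (v : String) : Option Nat :=
  if v = "historical" then some 0
  else if v = "national" then some 1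
  else if v = "yes" then some 2
  else if v = "no" then some 3
  else if v = "not mentioned" then some 4
  else if v = "not specified" then some 5
  else if v = "not applicable" then some 6
  else none

-- minimum rank occurring in a list
def minR : List String → Option Nat
  | [] => none
  | v :: rest =>
    match rankOf v, minR rest with
    | none, m => m
    | some r, none => some r
    | some r, some m => some (min r m)

lemma rankOf_spec {v : String} {j : Nat} (h : rankOf v = some j) : j < 7 ∧ pstr j = v := by
  unfold rankOf at h
  split_ifs at h <;>
    first
    | exact Option.noConfusion h
    | (injection h with h; subst h; subst ‹v = _›; exact ⟨by omega, by decide⟩)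

lemma rankOf_pstr (i : Nat) (hi : i < 7) : rankOf (pstr i) = some i := by
  interval_cases i <;> decide

lemma minR_mem {xs : List String} : ∀ {m : Nat}, minR xs = some m → ∃ v ∈ xs, rankOf v = some m := by
  induction xs with
  | nil => intro m h; simp [minR] at h
  | cons v rest ih =>
    intro m h
    unfold minR at h
    rcases hv : rankOf v with _ | r <;> rcases hr : minR rest with _ | m' <;> simp [hv, hr] at h
    · obtain ⟨w, hw, hww⟩ := ih hr
      exact ⟨w, by simp [hw], by rw [hww, h]⟩
    · exact ⟨v, by simp, by rw [hv, h]⟩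
    · by_cases hrm : r ≤ m'
      · exact ⟨v, by simp, by rw [hv]; congr 1; omega⟩
      · obtain ⟨w, hw, hww⟩ := ih hr
        exact ⟨w, by simp [hw], by rw [hww]; congr 1; omega⟩

lemma minR_le {xs : List String} {v : String} {r : Nat} (hm : v ∈ xs) (hr : rankOf v = some r) :
    ∃ m, minR xs = some m ∧ m ≤ r := by
  induction xs with
  | nil => simp at hm
  | cons w rest ih =>
    rcases List.mem_cons.mp hm with rfl | hm'
    · unfold minR
      rcases hmr : minR rest with _ | m' <;> simp [hr]
    · obtain ⟨m, hm1, hm2⟩ := ih hm'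
      unfold minR
      rcases hw : rankOf w with _ | rw <;> simp [hm1]
      · exact hm2
      · omega

lemma loopA_drop (xs : List String) (fb : String) :
    ∀ n i, i + n = 7 → (∀ k, k < i → pstr k ∉ xs) →
      pvLoopA (PySem.Set.ofList xs) fb
        ((["historical", "national", "yes", "no", "not mentioned", "not specified",
           "not applicable"] : List String).drop i) =
        (match minR xs with | some m => pstr m | none => fb) := by
  intro n
  induction n with
  | zero =>
    intro i hi hk
    have h7 : i = 7 := by omega
    subst h7
    rcases hm : minR xs with _ | m
    · rfl
    · exfalso
      obtain ⟨w, hw, hww⟩ := minR_mem hm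
      obtain ⟨hlt, hpw⟩ := rankOf_spec hww
      exact hk m hlt (hpw ▸ hw)
  | succ n ih =>
    intro i hi hk
    have hi7 : i < 7 := by omega
    have hdrop : (["historical", "national", "yes", "no", "not mentioned", "not specified",
        "not applicable"] : List String).drop i =
        pstr i :: (["historical", "national", "yes", "no", "not mentioned", "not specified",
        "not applicable"] : List String).drop (i + 1) := by
      interval_cases i <;> rfl
    rw [hdrop]
    by_cases hin : pstr i ∈ xs
    · have hcon : PySem.Set.contains (PySem.Set.ofList xs) (pstr i) = true :=
        (PySem.Set.contains_iff _ _).mpr ((PySem.Set.mem_ofList _ _).mpr hin)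
      simp only [pvLoopA, hcon, if_true]
      obtain ⟨m, hm1, hm2⟩ := minR_le hin (rankOf_pstr i hi7)
      have hge : i ≤ m := by
        by_contra hlt
        push Not at hlt
        obtain ⟨w, hw, hww⟩ := minR_mem hm1
        obtain ⟨_, hpw⟩ := rankOf_spec hww
        exact hk m hlt (hpw ▸ hw)
      have hm0 : m = i := by omega
      rw [hm1, hm0]
    · have hcon : PySem.Set.contains (PySem.Set.ofList xs) (pstr i) = false := by
        rw [← Bool.not_eq_true]
        intro hc
        exact hin ((PySem.Set.mem_ofList _ _).mp ((PySem.Set.contains_iff _ _).mp hc))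
      simp only [pvLoopA, hcon, Bool.false_eq_true, if_false]
      exact ih (i + 1) (by omega) (by
        intro k hk'
        rcases Nat.lt_succ_iff_lt_or_eq.mp hk' with h | h
        · exact hk k h
        · subst h; exact hin)

lemma rank_get (v : String) : PySem.Dict.get? pvRank v = (rankOf v).map (fun j => (j : Int)) := by
  have h : pvRank = PySem.Dict.mk
      [("historical", 0), ("national", 1), ("yes", 2), ("no", 3),
       ("not mentioned", 4), ("not specified", 5), ("not applicable", 6)] := by decide
  rw [h, rankOf]
  repeat rw [PySem.Dict.get?_mk_cons]
  simp only [beq_iff_eq, eq_comm (b := v)]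
  split_ifs <;> simp_all [PySem.Dict.get?]

lemma rank_get_none {v : String} (h : rankOf v = none) : PySem.Dict.get? pvRank v = none := by
  rw [rank_get, h]; rfl

lemma rank_get_some {v : String} {r : Nat} (h : rankOf v = some r) :
    PySem.Dict.get? pvRank v = some ((r : Nat) : Int) := by
  rw [rank_get, h]; rfl

lemma pairEq (a b : Nat) (h : a = b) :
    ((some (pstr a), some ((a : Nat) : Int)) : Option String × Option Int) =
      (some (pstr b), some ((b : Nat) : Int)) := by rw [h]

lemma loopB_some (xs : List String) : ∀ (j : Nat), j < 7 → ∀ (v : String), pstr j = v →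
    pvLoopB xs (some v) (some ((j : Nat) : Int)) =
      (some (pstr (match minR xs with | none => j | some m => min m j)),
       some (((match minR xs with | none => j | some m => min m j) : Nat) : Int)) := by
  induction xs with
  | nil => intro j hj v hv; simp [pvLoopB, minR, ← hv]
  | cons w rest ih =>
    intro j hj v hv
    rcases hw : rankOf w with _ | r
    · simp only [pvLoopB, rank_get_none hw]
      rw [ih j hj v hv]
      apply pairEq
      simp [minR, hw]
    · obtain ⟨hr7, hpr⟩ := rankOf_spec hw
      simp only [pvLoopB, rank_get_some hw]
      by_cases hlt : r < j
      · have hc : (decide ((r : Int) < (j : Int))) = true := by simp; omega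
        simp only [hc, if_true]
        rw [ih r hr7 w hpr]
        apply pairEq
        rcases hmr : minR rest with _ | m <;> simp [minR, hw, hmr] <;> omega
      · have hc : (decide ((r : Int) < (j : Int))) = false := by simp; omega
        simp only [hc, Bool.false_eq_true, if_false]
        rw [ih j hj v hv]
        apply pairEq
        rcases hmr : minR rest with _ | m <;> simp [minR, hw, hmr] <;> omega

lemma loopB_none (xs : List String) :
    pvLoopB xs none none =
      (match minR xs with
       | none => (none, none)
       | some m => (some (pstr m), some ((m : Nat) : Int))) := by
  induction xs with
  | nil => simp [pvLoopB, minR]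
  | cons w rest ih =>
    rcases hw : rankOf w with _ | r
    · simp only [pvLoopB, rank_get_none hw]
      rw [ih]
      rcases hmr : minR rest with _ | m <;> simp [minR, hw, hmr]
    · obtain ⟨hr7, hpr⟩ := rankOf_spec hw
      simp only [pvLoopB, rank_get_some hw, if_true]
      rw [loopB_some rest r hr7 w hpr]
      rcases hmr : minR rest with _ | m <;> simp [minR, hw, hmr]
      exact ⟨by congr 1; omega, by omega⟩

lemma A_char (xs : List String) :
    choose_default_enum_value xs =
      (match minR xs with
       | some m => pstr m
       | none => (PySem.List.pyGet? xs 0).getD "") := by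
  have h := loopA_drop xs ((PySem.List.pyGet? xs 0).getD "") 7 0 (by omega)
    (by intro k hk; omega)
  simp only [List.drop_zero] at h
  exact h

lemma B_char (xs : List String) :
    choose_default_enum_value_alt xs =
      (match minR xs with
       | some m => pstr m
       | none => (PySem.List.pyGet? xs 0).getD "") := by
  unfold choose_default_enum_value_alt
  rw [loopB_none]
  rcases hm : minR xs with _ | m <;> simp

-- ===== VERDICT (by name: the statement is the Claim_ definition above) =====
theorem choose_default_enum_value_spec : Claim_equal_choose_default_enum_value := by
  intro xs _ _
  unfold Spec_choose_default_enum_value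
  rw [A_char, B_char]
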